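-- pv_equiv track=rewrite | github.com/ravmike/deep-research-skill | scripts/md_to_html.py | _strip_preamble_before_first_section
-- ===== SOURCE A (Python) =====
-- def _strip_preamble_before_first_section(markdown: str) -> str:
--     lines = markdown.splitlines()
--     processed_lines = []
--     skip_until_first_section = True
--
--     for line in lines:
--         if skip_until_first_section:
--             if line.startswith("## ") and not line.startswith("### "):
--                 skip_until_first_section = False
--                 processed_lines.append(line)
--             continue
--         processed_lines.append(line)
--
--     return "\n".join(processed_lines)
-- ===== SOURCE B (Python) =====
-- def _strip_preamble_before_first_section(markdown: str) -> str:
--     lines = markdown.splitlines()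
--     idx = next((i for i, line in enumerate(lines) if line.startswith("## ")), None)
--     if idx is None:
--         return ""
--     return "\n".join(lines[idx:])
-- ===== Notes on version B (the rewrite author's own statement) =====
-- stated objective: simpler
-- what changed: B locates the first '## ' line once (find-then-slice) and joins the tail, replacing A's boolean skip-flag loop with per-line appends; the redundant '### ' check is dropped since no '### ' line starts with '## '.
import Mathlib
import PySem

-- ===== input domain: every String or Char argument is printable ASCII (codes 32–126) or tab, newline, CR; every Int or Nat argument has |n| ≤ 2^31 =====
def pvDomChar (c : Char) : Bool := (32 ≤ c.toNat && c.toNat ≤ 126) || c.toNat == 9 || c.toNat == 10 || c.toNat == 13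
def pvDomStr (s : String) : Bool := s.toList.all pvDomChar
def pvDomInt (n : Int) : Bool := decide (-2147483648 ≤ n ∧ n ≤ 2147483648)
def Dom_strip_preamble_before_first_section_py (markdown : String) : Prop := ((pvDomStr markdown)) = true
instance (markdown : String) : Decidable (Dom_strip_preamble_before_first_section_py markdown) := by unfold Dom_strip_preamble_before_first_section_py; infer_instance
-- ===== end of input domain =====

-- B computes the cut point once (find-then-slice) instead of A's boolean skip-flag loop; simpler, same O(n) cost.

-- ===== PORT A =====
-- one loop step of A: state = (skip_until_first_section, processed_lines)
def pvAStep (st : Bool × List String) (line : String) : Bool × List String :=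
  if st.1 then
    if PySem.Str.startswith line "## " && !(PySem.Str.startswith line "### ") then
      (false, st.2 ++ [line])
    else st
  else (st.1, st.2 ++ [line])

def strip_preamble_before_first_section_py (markdown : String) : String :=
  let lines := PySem.Str.splitlines markdown
  let st := lines.foldl pvAStep (true, [])
  PySem.Str.join "\n" st.2

-- ===== PORT B =====
def strip_preamble_before_first_section_py_alt (markdown : String) : String :=
  let lines := PySem.Str.splitlines markdown
  match lines.findIdx? (fun line => PySem.Str.startswith line "## ") with
  | none => ""
  | some i => PySem.Str.join "\n" (lines.drop i)

-- ===== PRECONDITION & SPEC =====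
def Spec_strip_preamble_before_first_section_py (markdown : String) (out : String) : Prop := out = strip_preamble_before_first_section_py_alt markdown
instance (markdown : String) (out : String) : Decidable (Spec_strip_preamble_before_first_section_py markdown out) := by unfold Spec_strip_preamble_before_first_section_py; infer_instance

-- ===== CLAIM (what is proved, stated in full; the proofs are below) =====
def Claim_equal_strip_preamble_before_first_section_py : Prop := ∀ (markdown : String), Dom_strip_preamble_before_first_section_py markdown → Spec_strip_preamble_before_first_section_py markdown (strip_preamble_before_first_section_py markdown)

-- ===== LEMMAS AND PROOFS =====

-- a line starting with "### " never starts with "## " (third char '#' vs ' ')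
theorem pv_not_sharp (l : String) (h : PySem.Str.startswith l "## " = true) :
    PySem.Str.startswith l "### " = false := by
  by_contra hc
  rw [Bool.not_eq_false] at hc
  simp only [PySem.Str.startswith_eq] at h hc
  rw [PySem.Chars.startswith_iff] at h hc
  obtain ⟨t, ht⟩ := h
  obtain ⟨u, hu⟩ := hc
  rw [← ht] at hu
  simp at hu

-- once the flag is false, A just appends every remaining line
theorem pv_foldl_false (rest : List String) : ∀ acc : List String,
    rest.foldl pvAStep (false, acc) = (false, acc ++ rest) := by
  induction rest with
  | nil => intro acc; simp
  | cons l ls ih =>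
    intro acc
    simp only [List.foldl_cons, pvAStep]
    simpa using ih (acc ++ [l])

-- A's accumulated lines = the suffix from the first "## " line (or [] if none)
theorem pv_main (ls : List String) :
    (ls.foldl pvAStep (true, [])).2 =
      (match ls.findIdx? (fun line => PySem.Str.startswith line "## ") with
       | none => ([] : List String)
       | some i => ls.drop i) := by
  induction ls with
  | nil => simp
  | cons l ls ih =>
    rw [List.foldl_cons, List.findIdx?_cons]
    by_cases h : PySem.Str.startswith l "## " = true
    · have hs := pv_not_sharp l h
      simp only [pvAStep, h, hs, Bool.not_false, Bool.and_self, if_true]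
      rw [pv_foldl_false]
      simp
    · simp only [Bool.not_eq_true] at h
      simp only [pvAStep, h, Bool.false_and, Bool.false_eq_true, if_false, if_true]
      rw [ih]
      cases hf : ls.findIdx? (fun line => PySem.Str.startswith line "## ") with
      | none => simp [hf]
      | some i => simp

-- ===== VERDICT (by name: the statement is the Claim_ definition above) =====
theorem strip_preamble_before_first_section_py_spec : Claim_equal_strip_preamble_before_first_section_py := by
  intro markdown _
  unfold Spec_strip_preamble_before_first_section_py
  unfold strip_preamble_before_first_section_py strip_preamble_before_first_section_py_alt
  simp only [pv_main]
  cases hf : (PySem.Str.splitlines markdown).findIdx? (fun line => PySem.Str.startswith line "## ") with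
  | none => simp [PySem.Str.join]
  | some i => simp
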